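-- pv_equiv track=rewrite | github.com/thegeek-sys/uni | ALG2/redo.py | es17
-- ===== SOURCE A (Python) =====
-- def es17(G,C,a,b):
--     D=[-1]*len(G)
--     D[a]=0
--     coda=[a]
--     i=0
--     while len(coda) > i:
--         u=coda[i]
--         i+=1
--         for y in G[u]:
--             if D[y]==-1 and C[y]!=C[u]:
--                 D[y]=D[u]+1
--                 coda.append(y)
--     if D[b]==-1:
--         return None
--     return D[b]
-- ===== SOURCE B (Python) =====
-- def es17(G, C, a, b):
--     n = len(G)
--     dist = [n] * n
--     dist[a] = 0
--     for _ in range(n):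
--         new = dist[:]
--         changed = False
--         for u in range(n):
--             if dist[u] < n:
--                 for y in G[u]:
--                     if C[y] != C[u] and dist[u] + 1 < new[y]:
--                         new[y] = dist[u] + 1
--                         changed = True
--         dist = new
--         if not changed:
--             break
--     return dist[b] if dist[b] < n else None
-- ===== Notes on version B (the rewrite author's own statement) =====
-- stated objective: alternative
-- what changed: BFS with a queue and on-the-fly discovery marking is replaced by Bellman-Ford-style fixpoint iteration: a distance array initialised to n, relaxed by repeated Jacobi rounds that scan every edge of every already-reached node, stopping at the first round with no change; no queue, no frontier, no visit order.
-- outside the precondition, e.g. on es17([[-1], [], [1]], [0, 1, 1, 3], 0, 1): A returns 2, B returns None; on es17([[], [99]], [0, 1], 0, 0): A returns 0, B returns 0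
import Mathlib
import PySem

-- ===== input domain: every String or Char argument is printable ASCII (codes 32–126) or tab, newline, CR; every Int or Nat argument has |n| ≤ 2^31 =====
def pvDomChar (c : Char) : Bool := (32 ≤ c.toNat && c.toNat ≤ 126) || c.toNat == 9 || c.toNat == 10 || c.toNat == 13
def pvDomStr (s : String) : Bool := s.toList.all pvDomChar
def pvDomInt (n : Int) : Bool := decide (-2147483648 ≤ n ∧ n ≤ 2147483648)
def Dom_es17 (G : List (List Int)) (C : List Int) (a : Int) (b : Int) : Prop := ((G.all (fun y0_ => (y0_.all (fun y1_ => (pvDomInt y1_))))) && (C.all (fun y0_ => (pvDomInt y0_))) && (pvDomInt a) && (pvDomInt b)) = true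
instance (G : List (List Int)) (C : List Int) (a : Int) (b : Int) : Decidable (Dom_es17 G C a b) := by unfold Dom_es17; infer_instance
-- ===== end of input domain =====

-- B replaces the queue BFS by Bellman-Ford-style fixpoint iteration (Jacobi relaxation rounds
-- over all edges of reached nodes, stopping at the first unchanged round); alternative algorithm.


-- ===== PORT A =====
-- body of A's 'for y in G[u]' loop; state = (D, new nodes appended to coda during this row)
def es17RowA (C : List Int) (u : Int) (st : List Int × List Int) (y : Int) : List Int × List Int :=
  if PySem.List.pyGetD st.1 y 0 = -1 ∧ PySem.List.pyGetD C y 0 ≠ PySem.List.pyGetD C u 0 then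
    (PySem.List.pySetD st.1 y (PySem.List.pyGetD st.1 u 0 + 1), st.2 ++ [y])
  else st

-- A's 'while len(coda) > i' loop, with 'coda[i:]' kept as the todo list; one fuel unit per
-- dequeue (at most |G| dequeues happen on inputs in Pre_, proved in the lemmas below)
def es17LoopA (G : List (List Int)) (C : List Int) : Nat → List Int → List Int → List Int
  | 0, D, _ => D
  | _ + 1, D, [] => D
  | f + 1, D, u :: rest =>
    let st := (PySem.List.pyGetD G u []).foldl (es17RowA C u) (D, [])
    es17LoopA G C f st.1 (rest ++ st.2)

def es17 (G : List (List Int)) (C : List Int) (a : Int) (b : Int) : Option Int :=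
  let D0 := PySem.List.pySetD (List.replicate G.length (-1 : Int)) a 0
  let Dfin := es17LoopA G C G.length D0 [a]
  if PySem.List.pyGetD Dfin b 0 = -1 then none else some (PySem.List.pyGetD Dfin b 0)

-- ===== PORT B =====
-- body of B's 'for y in G[u]' relaxation; state = (new, changed); dist is the round's old array
def es17RowB (C : List Int) (dist : List Int) (u : Int) (st : List Int × Bool) (y : Int) :
    List Int × Bool :=
  if PySem.List.pyGetD C y 0 ≠ PySem.List.pyGetD C u 0 ∧
      PySem.List.pyGetD dist u 0 + 1 < PySem.List.pyGetD st.1 y 0 then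
    (PySem.List.pySetD st.1 y (PySem.List.pyGetD dist u 0 + 1), true)
  else st

-- one Jacobi round: 'new = dist[:]; changed = False; for u in range(n): if dist[u] < n: …'
def es17RoundB (G : List (List Int)) (C : List Int) (dist : List Int) : List Int × Bool :=
  (PySem.List.pyRange 0 (G.length : Int) 1).foldl
    (fun st u =>
      if PySem.List.pyGetD dist u 0 < (G.length : Int) then
        (PySem.List.pyGetD G u []).foldl (es17RowB C dist u) st
      else st)
    (dist, false)

-- B's 'for _ in range(n)' loop with the 'if not changed: break' early exit
def es17LoopB (G : List (List Int)) (C : List Int) : Nat → List Int → List Int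
  | 0, dist => dist
  | f + 1, dist =>
    let st := es17RoundB G C dist
    if st.2 then es17LoopB G C f st.1 else st.1

def es17_alt (G : List (List Int)) (C : List Int) (a : Int) (b : Int) : Option Int :=
  let dist0 := PySem.List.pySetD (List.replicate G.length (G.length : Int)) a 0
  let dfin := es17LoopB G C G.length dist0
  if PySem.List.pyGetD dfin b 0 < (G.length : Int) then some (PySem.List.pyGetD dfin b 0)
  else none

-- ===== PRECONDITION & SPEC =====
-- Pre_ is a closed-form superset of A's no-crash condition: a, b and every neighbour label must
-- be a Python-valid index of G (negative wraparound included).  It additionally requires one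
-- colour per node (|C| = |G|): A also returns when C is longer, but there a raw negative label
-- wraps over |C| in A and over |G| in B's normalised scan, so the colour read differs; and it
-- over-excludes invalid labels sitting in rows the traversal never reaches, where A returns too.
-- See the cited examples in the claim.
def Pre_es17 (G : List (List Int)) (C : List Int) (a : Int) (b : Int) : Prop :=
  PySem.Raise.InRange G.length a ∧ PySem.Raise.InRange G.length b ∧ C.length = G.length ∧
  ∀ row ∈ G, ∀ y ∈ row, PySem.Raise.InRange G.length y
instance (G : List (List Int)) (C : List Int) (a : Int) (b : Int) : Decidable (Pre_es17 G C a b) := by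
  unfold Pre_es17; infer_instance

def pvWitness_es17 : List (List Int) × List Int × Int × Int := ([[1], [0]], [0, 1], 0, 1)

def Spec_es17 (G : List (List Int)) (C : List Int) (a : Int) (b : Int) (out : Option Int) : Prop :=
  out = es17_alt G C a b
instance (G : List (List Int)) (C : List Int) (a : Int) (b : Int) (out : Option Int) :
    Decidable (Spec_es17 G C a b out) := by unfold Spec_es17; infer_instance

-- ===== CLAIM (what is proved, stated in full; the proofs are below) =====
def Claim_equal_es17 : Prop := ∀ (G : List (List Int)) (C : List Int) (a : Int) (b : Int),
  Dom_es17 G C a b → Pre_es17 G C a b → Spec_es17 G C a b (es17 G C a b)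

-- ===== LEMMAS AND PROOFS =====

-- the array cell a Python index i of a length-n list denotes (negative wraparound)
def pvCell (n : Nat) (i : Int) : Nat := if 0 ≤ i then i.toNat else n - (-i).toNat
-- B's view of a distance cell: n for undiscovered (-1), the BFS distance otherwise
def pvDist (n : Nat) (x : Int) : Int := if x = -1 then (n : Int) else x
-- number of undiscovered (still -1) cells
def pvUnm (D : List Int) : Nat := D.countP (fun x => decide (x = -1))
-- 'some constrained edge from cell c lands on cell j' (row = the raw adjacency list of c)
def pvHitRow (n : Nat) (C : List Int) (c : Nat) (row : List Int) (j : Nat) : Bool :=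
  row.any (fun y => decide (pvCell n y = j ∧ C.getD (pvCell n y) 0 ≠ C.getD c 0))
-- hit from some raw frontier label u ∈ F
def pvHitF (n : Nat) (C : List Int) (G : List (List Int)) (F : List Int) (j : Nat) : Bool :=
  F.any (fun u => pvHitRow n C (pvCell n u) (G.getD (pvCell n u) []) j)
-- hit from some cell c with distance value k
def pvHitS (n : Nat) (C : List Int) (G : List (List Int)) (D : List Int) (k : Int) (j : Nat) : Bool :=
  (List.range n).any (fun c => decide (D.getD c 0 = k) && pvHitRow n C c (G.getD c []) j)
-- A's whole-level fold (proof-side view of |F| consecutive iterations of A's while loop)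
def pvLevelA (G : List (List Int)) (C : List Int) (D : List Int) (F : List Int) :
    List Int × List Int :=
  F.foldl (fun st u =>
    let r := (PySem.List.pyGetD G u []).foldl (es17RowA C u) (st.1, [])
    (r.1, st.2 ++ r.2)) (D, [])
-- characterisation of B's evolving round state: H = hits contributed by the processed prefix
def pvChar (n : Nat) (D : List Int) (k : Int) (H : Nat → Bool) (st : List Int × Bool) : Prop :=
  st.1.length = n ∧
  (∀ j, st.1.getD j 0 = if D.getD j 0 = -1 then (if H j then k + 1 else (n : Int)) else D.getD j 0) ∧
  (st.2 = true ↔ ∃ j, j < n ∧ D.getD j 0 = -1 ∧ H j = true)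

lemma pvIdx_some (n : Nat) (i : Int) (h : PySem.Raise.InRange n i) :
    PySem.List.pyIdx? n i = some (pvCell n i) := by
  obtain ⟨h1, h2⟩ := h
  unfold PySem.List.pyIdx? pvCell
  split_ifs with h3 <;> rfl

lemma pvCell_lt (n : Nat) (i : Int) (h : PySem.Raise.InRange n i) : pvCell n i < n := by
  obtain ⟨h1, h2⟩ := h
  unfold pvCell
  split_ifs <;> omega

lemma pvGetD_cell {α : Type} (n : Nat) (D : List α) (i : Int) (d : α)
    (hl : D.length = n) (h : PySem.Raise.InRange n i) :
    PySem.List.pyGetD D i d = D.getD (pvCell n i) d := by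
  subst hl
  have hlt := pvCell_lt D.length i h
  rw [PySem.List.pyGetD, PySem.List.pyGet?, pvIdx_some _ _ h]
  simp [List.getElem?_eq_getElem hlt]

lemma pvSetD_cell {α : Type} (n : Nat) (D : List α) (i : Int) (v : α)
    (hl : D.length = n) (h : PySem.Raise.InRange n i) :
    PySem.List.pySetD D i v = D.set (pvCell n i) v := by
  subst hl
  rw [PySem.List.pySetD, PySem.List.pySet?, pvIdx_some _ _ h]
  rfl

lemma pvGetD_set {α : Type} (D : List α) (k j : Nat) (v d : α) :
    (D.set k v).getD j d = if j = k ∧ k < D.length then v else D.getD j d := by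
  simp only [List.getD_eq_getElem?_getD, List.getElem?_set]
  rcases eq_or_ne j k with rfl | hne
  · by_cases h2 : j < D.length
    · simp [h2]
    · simp [h2]
  · simp [hne, Ne.symm hne]

lemma pvUnm_replicate (n : Nat) : pvUnm (List.replicate n (-1)) = n := by
  simp [pvUnm, List.countP_replicate]

lemma pvUnm_set (D : List Int) (j : Nat) (v : Int) (hj : j < D.length)
    (h0 : D.getD j 0 = -1) (hv : v ≠ -1) : pvUnm D = pvUnm (D.set j v) + 1 := by
  have hDj : D[j] = -1 := by rw [List.getD_eq_getElem _ _ hj] at h0; exact h0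
  have h1 : D.set j v = D.take j ++ v :: D.drop (j + 1) := by
    rw [List.set_eq_take_append_cons_drop, if_pos hj]
  have h2 : D = D.take j ++ D[j] :: D.drop (j + 1) := by
    conv_lhs => rw [← List.take_append_drop j D, List.drop_eq_getElem_cons hj]
  rw [pvUnm, pvUnm, h1]
  conv_lhs => rw [h2]
  simp [List.countP_append, hDj, hv]
  omega

lemma pvUnm_pos (D : List Int) (j : Nat) (hj : j < D.length) (h : D.getD j 0 = -1) :
    1 ≤ pvUnm D := by
  have : D[j] = -1 := by rw [List.getD_eq_getElem _ _ hj] at h; exact h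
  have hmem : (-1 : Int) ∈ D := this ▸ List.getElem_mem hj
  rw [pvUnm]
  exact List.countP_pos_iff.2 ⟨-1, hmem, by simp⟩

lemma pvExt (xs ys : List Int) (hl : xs.length = ys.length)
    (h : ∀ j, xs.getD j 0 = ys.getD j 0) : xs = ys := by
  apply List.ext_getElem hl
  intro j hj1 hj2
  have := h j
  rwa [List.getD_eq_getElem _ _ hj1, List.getD_eq_getElem _ _ hj2] at this

lemma pvChar_iff (n : Nat) (D : List Int) (k : Int) (H H' : Nat → Bool)
    (hH : ∀ j, H j = H' j) (st : List Int × Bool) (h : pvChar n D k H st) :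
    pvChar n D k H' st := by
  have : H = H' := funext hH
  rwa [this] at h

-- ---- A side: pull out accumulators ----
lemma pvPullRowA (C : List Int) (u : Int) : ∀ (row : List Int) (D acc : List Int),
    row.foldl (es17RowA C u) (D, acc)
      = ((row.foldl (es17RowA C u) (D, [])).1, acc ++ (row.foldl (es17RowA C u) (D, [])).2) := by
  intro row
  induction row with
  | nil => intro D acc; simp
  | cons y rest ih =>
    intro D acc
    simp only [List.foldl_cons, es17RowA]
    by_cases h : PySem.List.pyGetD D y 0 = -1 ∧ PySem.List.pyGetD C y 0 ≠ PySem.List.pyGetD C u 0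
    · simp only [if_pos h]
      rw [ih _ (acc ++ [y]), ih _ ([] ++ [y])]
      simp
    · simp only [if_neg h]
      exact ih _ acc

lemma pvPullLevelA (G : List (List Int)) (C : List Int) : ∀ (F : List Int) (D acc : List Int),
    F.foldl (fun st u =>
        let r := (PySem.List.pyGetD G u []).foldl (es17RowA C u) (st.1, [])
        (r.1, st.2 ++ r.2)) (D, acc)
      = ((pvLevelA G C D F).1, acc ++ (pvLevelA G C D F).2) := by
  intro F
  induction F with
  | nil => intro D acc; simp [pvLevelA]
  | cons u F' ih =>
    intro D acc
    simp only [pvLevelA, List.foldl_cons]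
    rw [ih _ (acc ++ _), ih _ ([] ++ _)]
    simp [pvLevelA]

lemma pvLevelA_cons (G : List (List Int)) (C : List Int) (D : List Int) (u : Int) (F' : List Int) :
    pvLevelA G C D (u :: F')
      = ((pvLevelA G C ((PySem.List.pyGetD G u []).foldl (es17RowA C u) (D, [])).1 F').1,
         ((PySem.List.pyGetD G u []).foldl (es17RowA C u) (D, [])).2
           ++ (pvLevelA G C ((PySem.List.pyGetD G u []).foldl (es17RowA C u) (D, [])).1 F').2) :=
  pvPullLevelA G C F' _ _

lemma pvLoopA_nil (G : List (List Int)) (C : List Int) : ∀ (f : Nat) (D : List Int),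
    es17LoopA G C f D [] = D := by
  intro f D; cases f <;> rfl

lemma pvLoopA_level (G : List (List Int)) (C : List Int) : ∀ (F : List Int) (f : Nat) (D acc : List Int),
    es17LoopA G C (F.length + f) D (F ++ acc)
      = es17LoopA G C f (pvLevelA G C D F).1 (acc ++ (pvLevelA G C D F).2) := by
  intro F
  induction F with
  | nil => intro f D acc; simp [pvLevelA]
  | cons u F' ih =>
    intro f D acc
    have hlen : (u :: F').length + f = (F'.length + f) + 1 := by simp [List.length_cons]; omega
    rw [hlen]
    show es17LoopA G C (F'.length + f)
        ((PySem.List.pyGetD G u []).foldl (es17RowA C u) (D, [])).1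
        ((F' ++ acc) ++ ((PySem.List.pyGetD G u []).foldl (es17RowA C u) (D, [])).2) = _
    rw [List.append_assoc, ih]
    rw [pvLevelA_cons]
    simp [List.append_assoc]

lemma pvLoopA_level' (G : List (List Int)) (C : List Int) (F : List Int) (f : Nat) (D : List Int) :
    es17LoopA G C (F.length + f) D F
      = es17LoopA G C f (pvLevelA G C D F).1 (pvLevelA G C D F).2 := by
  have h := pvLoopA_level G C F f D []
  simpa using h

-- ---- A side: pointwise characterisation of one row ----
lemma pvHitRow_nil (n : Nat) (C : List Int) (c : Nat) (j : Nat) :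
    pvHitRow n C c [] j = false := by simp [pvHitRow]

lemma pvHitRow_cons (n : Nat) (C : List Int) (c : Nat) (y : Int) (row : List Int) (j : Nat) :
    pvHitRow n C c (y :: row) j
      = (decide (pvCell n y = j ∧ C.getD (pvCell n y) 0 ≠ C.getD c 0) || pvHitRow n C c row j) := by
  simp [pvHitRow]

lemma pvRowA_char (n : Nat) (C : List Int) (u : Int) (d : Int) (hd : 0 ≤ d)
    (hC : C.length = n) :
    ∀ (row : List Int) (D : List Int),
    D.length = n → (∀ y ∈ row, PySem.Raise.InRange n y) →
    PySem.Raise.InRange n u → D.getD (pvCell n u) 0 = d →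
    (row.foldl (es17RowA C u) (D, [])).1.length = n ∧
    (∀ j, (row.foldl (es17RowA C u) (D, [])).1.getD j 0
        = if D.getD j 0 = -1 then
            (if pvHitRow n C (pvCell n u) row j then d + 1 else -1)
          else D.getD j 0) ∧
    (∀ p ∈ (row.foldl (es17RowA C u) (D, [])).2, PySem.Raise.InRange n p) ∧
    (∀ j, (∃ p ∈ (row.foldl (es17RowA C u) (D, [])).2, pvCell n p = j)
        ↔ (D.getD j 0 = -1 ∧ pvHitRow n C (pvCell n u) row j = true)) ∧
    pvUnm D = pvUnm (row.foldl (es17RowA C u) (D, [])).1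
        + (row.foldl (es17RowA C u) (D, [])).2.length := by
  intro row
  induction row with
  | nil =>
    intro D hD hrow hu hud
    refine ⟨hD, fun j => ?_, by simp, fun j => by simp [pvHitRow_nil], by simp⟩
    rw [pvHitRow_nil]
    by_cases h : D.getD j 0 = -1 <;> simp [h]
  | cons y rest ih =>
    intro D hD hrow hu hud
    have hy : PySem.Raise.InRange n y := hrow y List.mem_cons_self
    have hrest : ∀ y' ∈ rest, PySem.Raise.InRange n y' :=
      fun y' h' => hrow y' (List.mem_cons_of_mem _ h')
    have hcy : pvCell n y < n := pvCell_lt n y hy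
    have hcylt : pvCell n y < D.length := by omega
    have e1 : PySem.List.pyGetD D y 0 = D.getD (pvCell n y) 0 := pvGetD_cell n D y 0 hD hy
    have e2 : PySem.List.pyGetD C y 0 = C.getD (pvCell n y) 0 := pvGetD_cell n C y 0 hC hy
    have e3 : PySem.List.pyGetD C u 0 = C.getD (pvCell n u) 0 := pvGetD_cell n C u 0 hC hu
    have e4 : PySem.List.pyGetD D u 0 = D.getD (pvCell n u) 0 := pvGetD_cell n D u 0 hD hu
    simp only [List.foldl_cons, es17RowA, e1, e2, e3, e4, hud]
    by_cases hcond : D.getD (pvCell n y) 0 = -1 ∧ C.getD (pvCell n y) 0 ≠ C.getD (pvCell n u) 0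
    · simp only [if_pos hcond]
      have hyu : pvCell n y ≠ pvCell n u := by
        intro h; rw [h, hud] at hcond; omega
      have e5 : PySem.List.pySetD D y (d + 1) = D.set (pvCell n y) (d + 1) :=
        pvSetD_cell n D y (d + 1) hD hy
      simp only [e5]
      set D1 := D.set (pvCell n y) (d + 1) with hD1def
      have hD1get : ∀ j, D1.getD j 0 = if j = pvCell n y then d + 1 else D.getD j 0 := by
        intro j
        rw [hD1def, pvGetD_set]
        by_cases h : j = pvCell n y <;> simp [h, hcylt]
      have hD1len : D1.length = n := by rw [hD1def, List.length_set, hD]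
      have hD1u : D1.getD (pvCell n u) 0 = d := by
        rw [hD1get, if_neg (Ne.symm hyu)]; exact hud
      obtain ⟨i1, i2, i3, i4, i5⟩ := ih D1 hD1len hrest hu hD1u
      rw [pvPullRowA C u rest D1 ([] ++ [y])]
      refine ⟨i1, fun j => ?_, ?_, fun j => ?_, ?_⟩
      · rw [i2 j, hD1get j, pvHitRow_cons]
        by_cases hj : j = pvCell n y
        · subst hj
          have e6 : (if pvCell n y = pvCell n y then d + 1 else D.getD (pvCell n y) 0) = d + 1 :=
            if_pos rfl
          rw [e6, decide_eq_true ⟨rfl, hcond.2⟩, if_neg (show ¬ (d + 1 : Int) = -1 by omega),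
            if_pos hcond.1]
          simp
        · have e6 : (if j = pvCell n y then d + 1 else D.getD j 0) = D.getD j 0 := if_neg hj
          rw [e6, decide_eq_false (fun h => hj h.1.symm), Bool.false_or]
      · intro p hp
        simp only [List.nil_append] at hp
        rcases List.mem_cons.1 hp with rfl | hp
        · exact hy
        · exact i3 p hp
      · simp only [List.nil_append, List.singleton_append, List.mem_cons, pvHitRow_cons]
        constructor
        · rintro ⟨p, hp | hp, hcp⟩
          · have hj : pvCell n y = j := by rw [← hp]; exact hcp
            refine ⟨by rw [← hj]; exact hcond.1, ?_⟩
            rw [decide_eq_true ⟨hj, hcond.2⟩, Bool.true_or]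
          · have h4 := (i4 j).1 ⟨p, hp, hcp⟩
            rw [hD1get j] at h4
            by_cases hj : j = pvCell n y
            · rw [if_pos hj] at h4; omega
            · rw [if_neg hj] at h4
              exact ⟨h4.1, by simp [h4.2]⟩
        · rintro ⟨hdj, hh⟩
          by_cases hj : j = pvCell n y
          · exact ⟨y, Or.inl rfl, hj.symm⟩
          · have hh' : pvHitRow n C (pvCell n u) rest j = true := by
              rcases Bool.or_eq_true_iff.1 hh with h | h
              · exact absurd ((of_decide_eq_true h).1) (fun he => hj he.symm)
              · exact h
            have := (i4 j).2 ⟨by rw [hD1get j, if_neg hj]; exact hdj, hh'⟩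
            obtain ⟨p, hp, hcp⟩ := this
            exact ⟨p, Or.inr hp, hcp⟩
      · have hcnt : pvUnm D = pvUnm D1 + 1 :=
          pvUnm_set D (pvCell n y) (d + 1) hcylt hcond.1 (by omega)
        simp only [List.nil_append, List.singleton_append, List.length_cons]
        omega
    · simp only [if_neg hcond]
      obtain ⟨i1, i2, i3, i4, i5⟩ := ih D hD hrest hu hud
      have hnc : ∀ j, (decide (pvCell n y = j ∧ C.getD (pvCell n y) 0 ≠ C.getD (pvCell n u) 0) = true)
          → ¬ D.getD j 0 = -1 ∨ j = pvCell n y ∧ ¬ D.getD (pvCell n y) 0 = -1 := by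
        intro j hj
        obtain ⟨hj1, hj2⟩ := of_decide_eq_true hj
        subst hj1
        right
        exact ⟨rfl, fun h => hcond ⟨h, hj2⟩⟩
      refine ⟨i1, fun j => ?_, i3, fun j => ?_, i5⟩
      · rw [i2 j, pvHitRow_cons]
        by_cases hdj : D.getD j 0 = -1
        · rw [if_pos hdj, if_pos hdj]
          have : decide (pvCell n y = j ∧ C.getD (pvCell n y) 0 ≠ C.getD (pvCell n u) 0) = false := by
            by_contra hcc
            rcases hnc j (by revert hcc; cases decide (pvCell n y = j ∧ C.getD (pvCell n y) 0 ≠ C.getD (pvCell n u) 0) <;> simp) with h | h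
            · exact h hdj
            · rw [h.1] at hdj; exact h.2 hdj
          rw [this, Bool.false_or]
        · rw [if_neg hdj, if_neg hdj]
      · rw [i4 j, pvHitRow_cons]
        constructor
        · rintro ⟨hdj, hh⟩
          exact ⟨hdj, by simp [hh]⟩
        · rintro ⟨hdj, hh⟩
          refine ⟨hdj, ?_⟩
          rcases Bool.or_eq_true_iff.1 hh with h | h
          · rcases hnc j h with h' | h'
            · exact absurd hdj h'
            · rw [h'.1] at hdj; exact absurd hdj h'.2
          · exact h

-- ---- A side: pointwise characterisation of one whole level ----
lemma pvHitF_nil (n : Nat) (C : List Int) (G : List (List Int)) (j : Nat) :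
    pvHitF n C G [] j = false := by simp [pvHitF]

lemma pvHitF_cons (n : Nat) (C : List Int) (G : List (List Int)) (u : Int) (F : List Int) (j : Nat) :
    pvHitF n C G (u :: F) j
      = (pvHitRow n C (pvCell n u) (G.getD (pvCell n u) []) j || pvHitF n C G F j) := by
  simp [pvHitF]

lemma pvLevelA_char (n : Nat) (G : List (List Int)) (C : List Int) (k : Int) (hk : 0 ≤ k)
    (hC : C.length = n) (hGn : G.length = n)
    (hG : ∀ row ∈ G, ∀ y ∈ row, PySem.Raise.InRange n y) :
    ∀ (F : List Int) (D : List Int),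
    D.length = n →
    (∀ u ∈ F, PySem.Raise.InRange n u ∧ D.getD (pvCell n u) 0 = k) →
    (pvLevelA G C D F).1.length = n ∧
    (∀ j, (pvLevelA G C D F).1.getD j 0
        = if D.getD j 0 = -1 then (if pvHitF n C G F j then k + 1 else -1) else D.getD j 0) ∧
    (∀ p ∈ (pvLevelA G C D F).2, PySem.Raise.InRange n p) ∧
    (∀ j, (∃ p ∈ (pvLevelA G C D F).2, pvCell n p = j) ↔ (D.getD j 0 = -1 ∧ pvHitF n C G F j = true)) ∧
    pvUnm D = pvUnm (pvLevelA G C D F).1 + (pvLevelA G C D F).2.length := by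
  intro F
  induction F with
  | nil =>
    intro D hD hF
    refine ⟨hD, fun j => ?_, by simp [pvLevelA], fun j => by simp [pvLevelA, pvHitF_nil], by simp [pvLevelA]⟩
    rw [pvHitF_nil]
    by_cases h : D.getD j 0 = -1 <;> simp [pvLevelA, h]
  | cons u F' ih =>
    intro D hD hF
    obtain ⟨hu, hud⟩ := hF u List.mem_cons_self
    have hF' : ∀ w ∈ F', PySem.Raise.InRange n w ∧ D.getD (pvCell n w) 0 = k :=
      fun w h => hF w (List.mem_cons_of_mem _ h)
    have hcu : pvCell n u < n := pvCell_lt n u hu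
    have erow : PySem.List.pyGetD G u [] = G.getD (pvCell n u) [] := pvGetD_cell n G u [] hGn hu
    have hrow : ∀ y ∈ G.getD (pvCell n u) [], PySem.Raise.InRange n y := by
      intro y hy
      have : G.getD (pvCell n u) [] = G[pvCell n u] :=
        List.getD_eq_getElem G [] (by omega)
      rw [this] at hy
      exact hG _ (List.getElem_mem (by omega)) y hy
    obtain ⟨r1, r2, r3, r4, r5⟩ :=
      pvRowA_char n C u k hk hC (G.getD (pvCell n u) []) D hD hrow hu hud
    rw [pvLevelA_cons, erow]
    set R := (G.getD (pvCell n u) []).foldl (es17RowA C u) (D, []) with hR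
    have hRu : ∀ w ∈ F', R.1.getD (pvCell n w) 0 = k := by
      intro w hw
      rw [r2, if_neg (by rw [(hF' w hw).2]; omega)]
      exact (hF' w hw).2
    obtain ⟨i1, i2, i3, i4, i5⟩ := ih R.1 r1 (fun w hw => ⟨(hF' w hw).1, hRu w hw⟩)
    refine ⟨i1, fun j => ?_, ?_, fun j => ?_, ?_⟩
    · rw [i2 j, r2 j, pvHitF_cons]
      by_cases hdj : D.getD j 0 = -1
      · rw [if_pos hdj, if_pos hdj]
        cases hhr : pvHitRow n C (pvCell n u) (G.getD (pvCell n u) []) j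
        · simp
        · simp [show (k + 1 : Int) ≠ -1 by omega]
      · rw [if_neg hdj, if_neg hdj, if_neg hdj]
    · intro p hp
      rcases List.mem_append.1 hp with hp | hp
      · exact r3 p hp
      · exact i3 p hp
    · rw [pvHitF_cons]
      constructor
      · rintro ⟨p, hp, hcp⟩
        rcases List.mem_append.1 hp with hp | hp
        · obtain ⟨h1, h2⟩ := (r4 j).1 ⟨p, hp, hcp⟩
          exact ⟨h1, by rw [h2, Bool.true_or]⟩
        · obtain ⟨h1, h2⟩ := (i4 j).1 ⟨p, hp, hcp⟩
          rw [r2 j] at h1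
          by_cases hdj : D.getD j 0 = -1
          · exact ⟨hdj, by rw [h2, Bool.or_true]⟩
          · rw [if_neg hdj] at h1
            exact absurd h1 hdj
      · rintro ⟨hdj, hh⟩
        cases hhr : pvHitRow n C (pvCell n u) (G.getD (pvCell n u) []) j
        · have hh' : pvHitF n C G F' j = true := by rwa [hhr, Bool.false_or] at hh
          obtain ⟨p, hp, hcp⟩ := (i4 j).2 ⟨by rw [r2 j, if_pos hdj, hhr]; simp, hh'⟩
          exact ⟨p, List.mem_append.2 (Or.inr hp), hcp⟩
        · obtain ⟨p, hp, hcp⟩ := (r4 j).2 ⟨hdj, hhr⟩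
          exact ⟨p, List.mem_append.2 (Or.inl hp), hcp⟩
    · dsimp only
      rw [List.length_append]
      omega

-- ---- B side helpers ----
lemma pvCell_natCast (n c : Nat) : pvCell n (c : Int) = c := by simp [pvCell]

lemma pvInRange_natCast (n c : Nat) (h : c < n) : PySem.Raise.InRange n (c : Int) := by
  constructor
  · omega
  · omega

lemma pvGetD_map_dist (m : Nat) (D : List Int) (j : Nat) :
    (D.map (pvDist m)).getD j 0 = pvDist m (D.getD j 0) := by
  rcases Nat.lt_or_ge j D.length with h | h
  · rw [List.getD_eq_getElem _ _ (by simpa using h), List.getD_eq_getElem _ _ h, List.getElem_map]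
  · rw [List.getD_eq_default _ _ (by simpa using h), List.getD_eq_default _ _ h]
    simp [pvDist]

-- ---- B side: one relaxation step of a frontier node ----
lemma pvRowB_step (n : Nat) (C : List Int) (D dist : List Int) (k : Int)
    (hC : C.length = n) (hD : D.length = n)
    (hvals : ∀ j, j < n → D.getD j 0 = -1 ∨ (0 ≤ D.getD j 0 ∧ D.getD j 0 ≤ k))
    (hkn : ∀ j, j < n → D.getD j 0 = -1 → k + 1 < (n : Int))
    (u : Int) (hu : PySem.Raise.InRange n u)
    (hku : PySem.List.pyGetD dist u 0 = k)
    (y : Int) (hy : PySem.Raise.InRange n y)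
    (st : List Int × Bool) (H : Nat → Bool) (hch : pvChar n D k H st) :
    pvChar n D k
      (fun j => H j || decide (pvCell n y = j ∧ C.getD (pvCell n y) 0 ≠ C.getD (pvCell n u) 0))
      (es17RowB C dist u st y) := by
  obtain ⟨h1, h2, h3⟩ := hch
  have hcy : pvCell n y < n := pvCell_lt n y hy
  have e2 : PySem.List.pyGetD C y 0 = C.getD (pvCell n y) 0 := pvGetD_cell n C y 0 hC hy
  have e3 : PySem.List.pyGetD C u 0 = C.getD (pvCell n u) 0 := pvGetD_cell n C u 0 hC hu
  have e4 : PySem.List.pyGetD st.1 y 0 = st.1.getD (pvCell n y) 0 := pvGetD_cell n st.1 y 0 h1 hy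
  simp only [es17RowB, e2, e3, e4, hku]
  by_cases hcd : C.getD (pvCell n y) 0 ≠ C.getD (pvCell n u) 0
  · by_cases hdy : D.getD (pvCell n y) 0 = -1
    · cases hHy : H (pvCell n y)
      · -- undiscovered, unhit: the relaxation fires
        have hval : st.1.getD (pvCell n y) 0 = (n : Int) := by
          rw [h2, if_pos hdy, hHy]; simp
        have hcond : k + 1 < st.1.getD (pvCell n y) 0 := by
          rw [hval]; exact hkn _ hcy hdy
        rw [if_pos ⟨hcd, hcond⟩]
        have e5 : PySem.List.pySetD st.1 y (k + 1) = st.1.set (pvCell n y) (k + 1) :=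
          pvSetD_cell n st.1 y (k + 1) h1 hy
        rw [e5]
        refine ⟨by rw [List.length_set]; exact h1, fun j => ?_, ?_⟩
        · beta_reduce
          rw [pvGetD_set]
          by_cases hj : j = pvCell n y
          · subst hj
            rw [if_pos ⟨rfl, by omega⟩, if_pos hdy, decide_eq_true ⟨rfl, hcd⟩]
            simp
          · rw [if_neg (by rintro ⟨h, -⟩; exact hj h), h2 j,
              decide_eq_false (fun h => hj h.1.symm), Bool.or_false]
        · beta_reduce
          simp only [true_iff]
          exact ⟨pvCell n y, hcy, hdy, by rw [decide_eq_true ⟨rfl, hcd⟩]; simp⟩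
      · -- undiscovered but already hit this round: cell already holds k+1
        have hval : st.1.getD (pvCell n y) 0 = k + 1 := by rw [h2, if_pos hdy, hHy]; simp
        rw [if_neg (by rintro ⟨-, hlt⟩; rw [hval] at hlt; omega)]
        refine ⟨h1, fun j => ?_, ?_⟩
        · beta_reduce
          rw [h2 j]
          by_cases hj : j = pvCell n y
          · subst hj; rw [hHy]; simp
          · rw [decide_eq_false (fun h => hj h.1.symm), Bool.or_false]
        · beta_reduce
          rw [h3]
          constructor
          · rintro ⟨j, hj, hdj, hh⟩; exact ⟨j, hj, hdj, by rw [hh]; simp⟩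
          · rintro ⟨j, hj, hdj, hh⟩
            by_cases hje : j = pvCell n y
            · exact ⟨pvCell n y, hcy, hdy, hHy⟩
            · rw [decide_eq_false (fun h => hje h.1.symm), Bool.or_false] at hh
              exact ⟨j, hj, hdj, hh⟩
    · -- already discovered: its distance is at most k, no relaxation
      have hdyv : 0 ≤ D.getD (pvCell n y) 0 ∧ D.getD (pvCell n y) 0 ≤ k :=
        (hvals _ hcy).resolve_left hdy
      have hval : st.1.getD (pvCell n y) 0 = D.getD (pvCell n y) 0 := by rw [h2, if_neg hdy]
      rw [if_neg (by rintro ⟨-, hlt⟩; rw [hval] at hlt; omega)]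
      refine ⟨h1, fun j => ?_, ?_⟩
      · beta_reduce
        rw [h2 j]
        by_cases hj : j = pvCell n y
        · subst hj; rw [if_neg hdy, if_neg hdy]
        · rw [decide_eq_false (fun h => hj h.1.symm), Bool.or_false]
      · beta_reduce
        rw [h3]
        constructor
        · rintro ⟨j, hj, hdj, hh⟩; exact ⟨j, hj, hdj, by rw [hh]; simp⟩
        · rintro ⟨j, hj, hdj, hh⟩
          by_cases hje : j = pvCell n y
          · subst hje; exact absurd hdj hdy
          · rw [decide_eq_false (fun h => hje h.1.symm), Bool.or_false] at hh
            exact ⟨j, hj, hdj, hh⟩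
  · -- colours agree: the filter rejects the edge
    rw [if_neg (by rintro ⟨h, -⟩; exact hcd h)]
    refine pvChar_iff n D k H _ (fun j => ?_) st ⟨h1, h2, h3⟩
    beta_reduce
    rw [decide_eq_false (fun h => hcd h.2), Bool.or_false]

-- ---- B side: a frontier row relaxation, whole row ----
lemma pvRowB_char (n : Nat) (C : List Int) (D dist : List Int) (k : Int)
    (hC : C.length = n) (hD : D.length = n)
    (hvals : ∀ j, j < n → D.getD j 0 = -1 ∨ (0 ≤ D.getD j 0 ∧ D.getD j 0 ≤ k))
    (hkn : ∀ j, j < n → D.getD j 0 = -1 → k + 1 < (n : Int))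
    (u : Int) (hu : PySem.Raise.InRange n u)
    (hku : PySem.List.pyGetD dist u 0 = k) :
    ∀ (row : List Int), (∀ y ∈ row, PySem.Raise.InRange n y) →
    ∀ (st : List Int × Bool) (H : Nat → Bool), pvChar n D k H st →
    pvChar n D k (fun j => H j || pvHitRow n C (pvCell n u) row j)
      (row.foldl (es17RowB C dist u) st) := by
  intro row
  induction row with
  | nil =>
    intro _ st H hch
    refine pvChar_iff n D k H _ (fun j => ?_) st hch
    beta_reduce
    rw [pvHitRow_nil, Bool.or_false]
  | cons y rest ih =>
    intro hrow st H hch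
    have hy : PySem.Raise.InRange n y := hrow y List.mem_cons_self
    have hrest : ∀ y' ∈ rest, PySem.Raise.InRange n y' :=
      fun y' h' => hrow y' (List.mem_cons_of_mem _ h')
    have hstep := pvRowB_step n C D dist k hC hD hvals hkn u hu hku y hy st H hch
    have := ih hrest _ _ hstep
    refine pvChar_iff n D k _ _ (fun j => ?_) _ this
    rw [pvHitRow_cons, Bool.or_assoc]

-- ---- B side: an interior (already closed) node relaxes nothing ----
lemma pvRowB_skip (n : Nat) (C : List Int) (D dist : List Int) (k : Int)
    (hC : C.length = n)
    (u : Int) (hu : PySem.Raise.InRange n u)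
    (hku : PySem.List.pyGetD dist u 0 = D.getD (pvCell n u) 0) :
    ∀ (row : List Int), (∀ y ∈ row, PySem.Raise.InRange n y) →
    (∀ y ∈ row, C.getD (pvCell n y) 0 ≠ C.getD (pvCell n u) 0 →
      D.getD (pvCell n y) 0 ≠ -1 ∧ D.getD (pvCell n y) 0 ≤ D.getD (pvCell n u) 0 + 1) →
    ∀ (st : List Int × Bool) (H : Nat → Bool), pvChar n D k H st →
    row.foldl (es17RowB C dist u) st = st := by
  intro row
  induction row with
  | nil => intro _ _ st H _; rfl
  | cons y rest ih =>
    intro hrow hclo st H hch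
    obtain ⟨h1, h2, h3⟩ := hch
    have hy : PySem.Raise.InRange n y := hrow y List.mem_cons_self
    have hcy : pvCell n y < n := pvCell_lt n y hy
    have e2 : PySem.List.pyGetD C y 0 = C.getD (pvCell n y) 0 := pvGetD_cell n C y 0 hC hy
    have e3 : PySem.List.pyGetD C u 0 = C.getD (pvCell n u) 0 := pvGetD_cell n C u 0 hC hu
    have e4 : PySem.List.pyGetD st.1 y 0 = st.1.getD (pvCell n y) 0 := pvGetD_cell n st.1 y 0 h1 hy
    have hstep : es17RowB C dist u st y = st := by
      simp only [es17RowB, e2, e3, e4, hku]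
      rw [if_neg ?_]
      rintro ⟨hcd, hlt⟩
      obtain ⟨hne, hle⟩ := hclo y List.mem_cons_self hcd
      rw [h2, if_neg hne] at hlt
      omega
    simp only [List.foldl_cons, hstep]
    exact ih (fun y' h' => hrow y' (List.mem_cons_of_mem _ h'))
      (fun y' h' => hclo y' (List.mem_cons_of_mem _ h')) st H ⟨h1, h2, h3⟩

-- ---- B side: characterisation of one whole round ----
lemma pvRound_eq (G : List (List Int)) (C : List Int) (dist : List Int) :
    es17RoundB G C dist = ((List.range G.length).map (fun c : Nat => (c : Int))).foldl
      (fun st u =>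
        if PySem.List.pyGetD dist u 0 < (G.length : Int) then
          (PySem.List.pyGetD G u []).foldl (es17RowB C dist u) st
        else st)
      (dist, false) := by
  rw [es17RoundB, PySem.List.pyRange_one]
  have h1 : (((G.length : Int)) - 0).toNat = G.length := by simp
  have h2 : (fun k : Nat => (0 : Int) + ↑k) = (fun k : Nat => (↑k : Int)) := by
    funext k; ring
  rw [h1, h2]

lemma pvRoundB_char (n : Nat) (C : List Int) (G : List (List Int)) (D : List Int)
    (k : Int) (hk : 0 ≤ k) (hC : C.length = n) (hD : D.length = n) (hGn : G.length = n)
    (hG : ∀ row ∈ G, ∀ y ∈ row, PySem.Raise.InRange n y)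
    (hvals : ∀ j, j < n → D.getD j 0 = -1 ∨ (0 ≤ D.getD j 0 ∧ D.getD j 0 ≤ k))
    (hvn : ∀ c : Nat, c < n → 0 ≤ D.getD c 0 → D.getD c 0 < (n : Int))
    (hkn : ∀ c : Nat, c < n → D.getD c 0 = k →
      ∀ j, j < n → D.getD j 0 = -1 → k + 1 < (n : Int))
    (hclo : ∀ c : Nat, c < n → 0 ≤ D.getD c 0 → D.getD c 0 < k →
      ∀ y ∈ G.getD c [], C.getD (pvCell n y) 0 ≠ C.getD c 0 →
      D.getD (pvCell n y) 0 ≠ -1 ∧ D.getD (pvCell n y) 0 ≤ D.getD c 0 + 1) :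
    pvChar n D k (pvHitS n C G D k) (es17RoundB G C (D.map (pvDist n))) := by
  set dist := D.map (pvDist n) with hdistdef
  have hdist : ∀ j, dist.getD j 0 = pvDist n (D.getD j 0) := fun j => pvGetD_map_dist n D j
  have hdistlen : dist.length = n := by rw [hdistdef, List.length_map, hD]
  rw [pvRound_eq, hGn, List.foldl_map]
  -- generalised induction over the processed prefix of range(n)
  suffices h : ∀ (L : List Nat), (∀ c ∈ L, c < n) →
      ∀ (st : List Int × Bool) (H : Nat → Bool), pvChar n D k H st →
      pvChar n D k
        (fun j => H j || L.any (fun c => decide (D.getD c 0 = k) && pvHitRow n C c (G.getD c []) j))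
        (L.foldl (fun (st : List Int × Bool) (c : Nat) =>
          if PySem.List.pyGetD dist (c : Int) 0 < (n : Int) then
            (PySem.List.pyGetD G (c : Int) []).foldl (es17RowB C dist (c : Int)) st
          else st) st) by
    have h0 : pvChar n D k (fun _ => false) (dist, false) := by
      refine ⟨hdistlen, fun j => ?_, by simp⟩
      beta_reduce
      rw [hdist j, pvDist]
      by_cases hdj : D.getD j 0 = -1
      · rw [if_pos hdj, if_pos hdj]
        simp
      · rw [if_neg hdj, if_neg hdj]
    have hmain := h (List.range n) (fun c hc => List.mem_range.1 hc) (dist, false) _ h0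
    have hfin := pvChar_iff n D k _ (pvHitS n C G D k)
      (fun j => by rw [Bool.false_or, pvHitS]) _ hmain
    exact hfin
  intro L
  induction L with
  | nil =>
    intro _ st H hch
    refine pvChar_iff n D k H _ (fun j => ?_) st hch
    beta_reduce
    simp
  | cons c L' ih =>
    intro hL st H hch
    have hc : c < n := hL c List.mem_cons_self
    have hcir : PySem.Raise.InRange n (c : Int) := pvInRange_natCast n c hc
    have hccell : pvCell n (c : Int) = c := pvCell_natCast n c
    have erow : PySem.List.pyGetD G (c : Int) [] = G.getD c [] := by
      rw [pvGetD_cell n G (c : Int) [] hGn hcir, hccell]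
    have hrowr : ∀ y ∈ G.getD c [], PySem.Raise.InRange n y := by
      intro y hy
      have : G.getD c [] = G[c] := List.getD_eq_getElem G [] (by omega)
      rw [this] at hy
      exact hG _ (List.getElem_mem (by omega)) y hy
    have hdc : PySem.List.pyGetD dist (c : Int) 0 = pvDist n (D.getD c 0) := by
      rw [pvGetD_cell n dist (c : Int) 0 hdistlen hcir, hccell, hdist c]
    simp only [List.foldl_cons]
    by_cases hdisc : D.getD c 0 = -1
    · -- unreached cell: guard 'dist[u] < n' is false
      have : ¬ PySem.List.pyGetD dist (c : Int) 0 < (n : Int) := by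
        rw [hdc, pvDist, if_pos hdisc]; omega
      rw [if_neg this]
      have hne : decide (D.getD c 0 = k) = false :=
        decide_eq_false (fun h => by rw [hdisc] at h; omega)
      have := ih (fun c' h' => hL c' (List.mem_cons_of_mem _ h')) st H hch
      refine pvChar_iff n D k _ _ (fun j => ?_) _ this
      beta_reduce
      rw [List.any_cons, hne, Bool.false_and, Bool.false_or]
    · have hpos : 0 ≤ D.getD c 0 := by
        rcases hvals c hc with h | h
        · exact absurd h hdisc
        · exact h.1
      have hguard : PySem.List.pyGetD dist (c : Int) 0 < (n : Int) := by
        rw [hdc, pvDist, if_neg hdisc]; exact hvn c hc hpos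
      rw [if_pos hguard]
      by_cases hck : D.getD c 0 = k
      · -- frontier cell: relax its whole row
        have hku : PySem.List.pyGetD dist (c : Int) 0 = k := by
          rw [hdc, pvDist, if_neg hdisc]; exact hck
        have hstep := pvRowB_char n C D dist k hC hD hvals (hkn c hc hck) (c : Int) hcir hku
          (G.getD c []) hrowr st H hch
        rw [← erow] at hstep
        have hstep' := pvChar_iff n D k _
          (fun j => H j || pvHitRow n C c (G.getD c []) j)
          (fun j => by beta_reduce; rw [hccell, erow]) _ hstep
        have := ih (fun c' h' => hL c' (List.mem_cons_of_mem _ h')) _ _ hstep'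
        refine pvChar_iff n D k _ _ (fun j => ?_) _ this
        beta_reduce
        rw [Bool.or_assoc, List.any_cons, decide_eq_true hck, Bool.true_and]
      · -- interior cell: closure says it relaxes nothing
        have hckl : D.getD c 0 < k := lt_of_le_of_ne ((hvals c hc).resolve_left hdisc).2 hck
        have hku : PySem.List.pyGetD dist (c : Int) 0 = D.getD (pvCell n (c : Int)) 0 := by
          rw [hdc, pvDist, if_neg hdisc, hccell]
        have hclor : ∀ y ∈ G.getD (pvCell n (c : Int)) [],
            C.getD (pvCell n y) 0 ≠ C.getD (pvCell n (c : Int)) 0 →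
            D.getD (pvCell n y) 0 ≠ -1 ∧
              D.getD (pvCell n y) 0 ≤ D.getD (pvCell n (c : Int)) 0 + 1 := by
          rw [hccell]
          exact hclo c hc hpos hckl
        have hskip := pvRowB_skip n C D dist k hC (c : Int) hcir hku
          (G.getD (pvCell n (c : Int)) []) (by rw [hccell]; exact hrowr) hclor st H hch
        rw [hccell, ← erow] at hskip
        rw [hskip]
        have := ih (fun c' h' => hL c' (List.mem_cons_of_mem _ h')) st H hch
        refine pvChar_iff n D k _ _ (fun j => ?_) _ this
        beta_reduce
        rw [List.any_cons, decide_eq_false hck, Bool.false_and, Bool.false_or]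

-- ---- main induction: B's round loop tracks A's level-by-level queue ----
lemma pvBool_eq (a b : Bool) (h : a = true ↔ b = true) : a = b := by
  cases a <;> cases b <;> simp_all

lemma pvHitRow_true (n : Nat) (C : List Int) (c : Nat) (row : List Int) (j : Nat) :
    pvHitRow n C c row j = true
      ↔ ∃ y ∈ row, pvCell n y = j ∧ C.getD (pvCell n y) 0 ≠ C.getD c 0 := by
  simp [pvHitRow]

lemma pvHitF_true (n : Nat) (C : List Int) (G : List (List Int)) (F : List Int) (j : Nat) :
    pvHitF n C G F j = true
      ↔ ∃ u ∈ F, pvHitRow n C (pvCell n u) (G.getD (pvCell n u) []) j = true := by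
  simp [pvHitF]

lemma pvHitS_true (n : Nat) (C : List Int) (G : List (List Int)) (D : List Int) (k : Int) (j : Nat) :
    pvHitS n C G D k j = true
      ↔ ∃ c : Nat, c < n ∧ D.getD c 0 = k ∧ pvHitRow n C c (G.getD c []) j = true := by
  simp [pvHitS, List.mem_range]

lemma pvRowIn (n : Nat) (G : List (List Int)) (hGn : G.length = n)
    (hG : ∀ row ∈ G, ∀ y ∈ row, PySem.Raise.InRange n y) (c : Nat) (hc : c < n) :
    ∀ y ∈ G.getD c [], PySem.Raise.InRange n y := by
  intro y hy
  have : G.getD c [] = G[c] := List.getD_eq_getElem G [] (by omega)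
  rw [this] at hy
  exact hG _ (List.getElem_mem (by omega)) y hy

lemma pvMain (n : Nat) (G : List (List Int)) (C : List Int)
    (hC : C.length = n) (hGn : G.length = n)
    (hG : ∀ row ∈ G, ∀ y ∈ row, PySem.Raise.InRange n y) :
    ∀ (fB : Nat), ∀ (fA : Nat) (D F : List Int) (k : Int),
    0 ≤ k → D.length = n →
    (∀ j, j < n → D.getD j 0 = -1 ∨
      (0 ≤ D.getD j 0 ∧ D.getD j 0 ≤ k ∧ D.getD j 0 + (pvUnm D : Int) ≤ (n : Int) - 1)) →
    (∀ u ∈ F, PySem.Raise.InRange n u) →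
    (∀ c : Nat, (∃ u ∈ F, pvCell n u = c) ↔ (c < n ∧ D.getD c 0 = k)) →
    (∀ c : Nat, c < n → 0 ≤ D.getD c 0 → D.getD c 0 < k →
      ∀ y ∈ G.getD c [], C.getD (pvCell n y) 0 ≠ C.getD c 0 →
      D.getD (pvCell n y) 0 ≠ -1 ∧ D.getD (pvCell n y) 0 ≤ D.getD c 0 + 1) →
    F.length + pvUnm D ≤ fA → pvUnm D + 1 ≤ fB →
    es17LoopB G C fB (D.map (pvDist n)) = (es17LoopA G C fA D F).map (pvDist n) ∧
    (∀ j, j < n → (es17LoopA G C fA D F).getD j 0 = -1 ∨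
      (0 ≤ (es17LoopA G C fA D F).getD j 0 ∧ (es17LoopA G C fA D F).getD j 0 < (n : Int))) ∧
    (es17LoopA G C fA D F).length = n := by
  intro fB
  induction fB with
  | zero =>
    intro fA D F k hk hD hvals hF hFcells hclo hfA hfB
    exact absurd hfB (by omega)
  | succ f ih =>
    intro fA D F k hk hD hvals hF hFcells hclo hfA hfB
    have hvals' : ∀ j, j < n → D.getD j 0 = -1 ∨ (0 ≤ D.getD j 0 ∧ D.getD j 0 ≤ k) := by
      intro j hj
      rcases hvals j hj with h | h
      · exact Or.inl h
      · exact Or.inr ⟨h.1, h.2.1⟩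
    have hvn : ∀ c : Nat, c < n → 0 ≤ D.getD c 0 → D.getD c 0 < (n : Int) := by
      intro c hc hpos
      rcases hvals c hc with h | h
      · omega
      · have : (0 : Int) ≤ (pvUnm D : Int) := by positivity
        omega
    have hknc : ∀ c : Nat, c < n → D.getD c 0 = k →
        ∀ j, j < n → D.getD j 0 = -1 → k + 1 < (n : Int) := by
      intro c hc hck j hj hdj
      have h1 : 1 ≤ pvUnm D := pvUnm_pos D j (by omega) hdj
      rcases hvals c hc with h | h
      · rw [hck] at h; omega
      · rw [hck] at h; omega
    have hbnd : ∀ j, j < n → D.getD j 0 = -1 ∨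
        (0 ≤ D.getD j 0 ∧ D.getD j 0 < (n : Int)) := by
      intro j hj
      rcases hvals j hj with h | h
      · exact Or.inl h
      · have : (0 : Int) ≤ (pvUnm D : Int) := by positivity
        exact Or.inr ⟨h.1, by omega⟩
    have hchar := pvRoundB_char n C G D k hk hC hD hGn hG hvals' hvn hknc hclo
    cases F with
    | nil =>
      -- empty queue: the round changes nothing, both sides stop
      have hempty : ∀ j, pvHitS n C G D k j = false := by
        intro j
        cases hS : pvHitS n C G D k j
        · rfl
        · obtain ⟨c, hc, hck, -⟩ := (pvHitS_true n C G D k j).1 hS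
          obtain ⟨u, hu, -⟩ := (hFcells c).2 ⟨hc, hck⟩
          simp at hu
      obtain ⟨c1, c2, c3⟩ := hchar
      have hst2 : (es17RoundB G C (D.map (pvDist n))).2 = false := by
        cases hst : (es17RoundB G C (D.map (pvDist n))).2
        · rfl
        · obtain ⟨j, -, -, hh⟩ := c3.1 hst
          rw [hempty j] at hh
          exact absurd hh (by simp)
      have hst1 : (es17RoundB G C (D.map (pvDist n))).1 = D.map (pvDist n) := by
        refine pvExt _ _ (by rw [c1, List.length_map, hD]) (fun j => ?_)
        rw [c2 j, pvGetD_map_dist, pvDist]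
        by_cases hdj : D.getD j 0 = -1
        · rw [if_pos hdj, if_pos hdj, hempty j]
          simp
        · rw [if_neg hdj, if_neg hdj]
      have hB : es17LoopB G C (f + 1) (D.map (pvDist n)) = D.map (pvDist n) := by
        show (if (es17RoundB G C (D.map (pvDist n))).2 then _ else (es17RoundB G C (D.map (pvDist n))).1) = _
        rw [hst2, if_neg (by simp), hst1]
      rw [pvLoopA_nil]
      exact ⟨hB, hbnd, hD⟩
    | cons u F' =>
      have hFval : ∀ w ∈ u :: F', PySem.Raise.InRange n w ∧ D.getD (pvCell n w) 0 = k := by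
        intro w hw
        have := (hFcells (pvCell n w)).1 ⟨w, hw, rfl⟩
        exact ⟨hF w hw, this.2⟩
      obtain ⟨l1, l2, l3, l4, l5⟩ :=
        pvLevelA_char n G C k hk hC hGn hG (u :: F') D hD hFval
      set L := pvLevelA G C D (u :: F') with hLdef
      -- A processes the whole level
      have hfAlev : fA = (u :: F').length + (fA - (u :: F').length) := by
        have := List.length_cons (a := u) (as := F')
        omega
      have hAstep : es17LoopA G C fA D (u :: F')
          = es17LoopA G C (fA - (u :: F').length) L.1 L.2 := by
        conv_lhs => rw [hfAlev]
        exact pvLoopA_level' G C (u :: F') _ D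
      -- the round characterisation, re-indexed by the frontier list
      have hbr : ∀ j, pvHitS n C G D k j = pvHitF n C G (u :: F') j := by
        intro j
        refine pvBool_eq _ _ ⟨?_, ?_⟩
        · intro hS
          obtain ⟨c, hc, hck, hrow⟩ := (pvHitS_true n C G D k j).1 hS
          obtain ⟨w, hw, hcw⟩ := (hFcells c).2 ⟨hc, hck⟩
          exact (pvHitF_true n C G _ j).2 ⟨w, hw, by rw [hcw]; exact hrow⟩
        · intro hFh
          obtain ⟨w, hw, hrow⟩ := (pvHitF_true n C G _ j).1 hFh
          have := (hFcells (pvCell n w)).1 ⟨w, hw, rfl⟩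
          exact (pvHitS_true n C G D k j).2 ⟨pvCell n w, this.1, this.2, hrow⟩
      have hchar' := pvChar_iff n D k _ (pvHitF n C G (u :: F')) hbr _ hchar
      obtain ⟨c1, c2, c3⟩ := hchar'
      have hcu : pvCell n u < n ∧ D.getD (pvCell n u) 0 = k :=
        (hFcells (pvCell n u)).1 ⟨u, List.mem_cons_self, rfl⟩
      have hkb : k + (pvUnm D : Int) ≤ (n : Int) - 1 := by
        rcases hvals _ hcu.1 with h | h
        · rw [hcu.2] at h; omega
        · rw [hcu.2] at h; exact h.2.2
      -- the new distance array is exactly the relaxed level, mapped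
      have hst1 : (es17RoundB G C (D.map (pvDist n))).1 = L.1.map (pvDist n) := by
        refine pvExt _ _ (by rw [c1, List.length_map, l1]) (fun j => ?_)
        rw [c2 j, pvGetD_map_dist, l2 j]
        by_cases hdj : D.getD j 0 = -1
        · rw [if_pos hdj, if_pos hdj]
          cases hh : pvHitF n C G (u :: F') j
          · rw [if_neg (by simp), if_neg (by simp), pvDist, if_pos rfl]
          · rw [if_pos rfl, if_pos rfl, pvDist, if_neg (by omega)]
        · rw [if_neg hdj, if_neg hdj, pvDist, if_neg hdj]
      cases hst : (es17RoundB G C (D.map (pvDist n))).2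
      · -- no relaxation fired: the level marked nothing, both sides stop with D unchanged
        have hnohit : ∀ j, j < n → ¬ (D.getD j 0 = -1 ∧ pvHitF n C G (u :: F') j = true) := by
          intro j hj h
          exact absurd (c3.2 ⟨j, hj, h.1, h.2⟩) (by rw [hst]; simp)
        have hL2 : L.2 = [] := by
          cases hL2c : L.2 with
          | nil => rfl
          | cons p ps =>
            have hp : p ∈ L.2 := by rw [hL2c]; exact List.mem_cons_self
            have := (l4 (pvCell n p)).1 ⟨p, hp, rfl⟩
            exact absurd this (hnohit _ (pvCell_lt n p (l3 p hp)))
        have hL1 : L.1 = D := by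
          refine pvExt _ _ (by rw [l1, hD]) (fun j => ?_)
          rw [l2 j]
          by_cases hdj : D.getD j 0 = -1
          · rw [if_pos hdj]
            cases hh : pvHitF n C G (u :: F') j
            · rw [if_neg (by simp)]
              omega
            · by_cases hjn : j < n
              · exact absurd ⟨hdj, hh⟩ (hnohit j hjn)
              · have : j < D.length := by
                  by_contra hc
                  rw [List.getD_eq_default _ _ (by omega)] at hdj
                  omega
                omega
          · rw [if_neg hdj]
        have hB : es17LoopB G C (f + 1) (D.map (pvDist n)) = D.map (pvDist n) := by
          show (if (es17RoundB G C (D.map (pvDist n))).2 then _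
            else (es17RoundB G C (D.map (pvDist n))).1) = _
          rw [hst, if_neg (by simp), hst1, hL1]
        rw [hAstep, hL2, pvLoopA_nil, hL1]
        exact ⟨hB, hbnd, hD⟩
      · -- something was relaxed: recurse one level deeper
        have hL2ne : 1 ≤ L.2.length := by
          obtain ⟨j, hj, hdj, hh⟩ := c3.1 hst
          obtain ⟨p, hp, -⟩ := (l4 j).2 ⟨hdj, hh⟩
          cases hL2c : L.2 with
          | nil => rw [hL2c] at hp; simp at hp
          | cons q qs => simp
        have hvalsL : ∀ j, j < n → L.1.getD j 0 = -1 ∨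
            (0 ≤ L.1.getD j 0 ∧ L.1.getD j 0 ≤ k + 1 ∧
              L.1.getD j 0 + (pvUnm L.1 : Int) ≤ (n : Int) - 1) := by
          intro j hj
          rw [l2 j]
          by_cases hdj : D.getD j 0 = -1
          · rw [if_pos hdj]
            cases hh : pvHitF n C G (u :: F') j
            · exact Or.inl (by rw [if_neg (by simp)])
            · rw [if_pos rfl]
              exact Or.inr ⟨by omega, by omega, by omega⟩
          · rw [if_neg hdj]
            rcases hvals j hj with h | h
            · exact absurd h hdj
            · refine Or.inr ⟨h.1, by omega, ?_⟩
              have : pvUnm L.1 ≤ pvUnm D := by omega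
              omega
        have hFcellsL : ∀ c : Nat, (∃ p ∈ L.2, pvCell n p = c) ↔ (c < n ∧ L.1.getD c 0 = k + 1) := by
          intro c
          constructor
          · rintro ⟨p, hp, hcp⟩
            have hlt : c < n := by rw [← hcp]; exact pvCell_lt n p (l3 p hp)
            obtain ⟨h1, h2⟩ := (l4 c).1 ⟨p, hp, hcp⟩
            refine ⟨hlt, ?_⟩
            rw [l2 c, if_pos h1, h2]
            simp
          · rintro ⟨hc, hval⟩
            rw [l2 c] at hval
            by_cases hdj : D.getD c 0 = -1
            · rw [if_pos hdj] at hval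
              cases hh : pvHitF n C G (u :: F') c
              · rw [hh] at hval; simp at hval; omega
              · exact (l4 c).2 ⟨hdj, hh⟩
            · rw [if_neg hdj] at hval
              rcases hvals c hc with h | h
              · exact absurd h hdj
              · omega
        have hcloL : ∀ c : Nat, c < n → 0 ≤ L.1.getD c 0 → L.1.getD c 0 < k + 1 →
            ∀ y ∈ G.getD c [], C.getD (pvCell n y) 0 ≠ C.getD c 0 →
            L.1.getD (pvCell n y) 0 ≠ -1 ∧ L.1.getD (pvCell n y) 0 ≤ L.1.getD c 0 + 1 := by
          intro c hc hpos hlt y hy hcd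
          have hyr : PySem.Raise.InRange n y := pvRowIn n G hGn hG c hc y hy
          have hcyn : pvCell n y < n := pvCell_lt n y hyr
          have hcval : L.1.getD c 0 = D.getD c 0 ∧ ¬ D.getD c 0 = -1 := by
            by_cases hdj : D.getD c 0 = -1
            · exfalso
              have hv := l2 c
              rw [if_pos hdj] at hv
              cases hh : pvHitF n C G (u :: F') c
              · rw [hh, if_neg (by simp)] at hv
                omega
              · rw [hh, if_pos rfl] at hv
                omega
            · have hv := l2 c
              rw [if_neg hdj] at hv
              exact ⟨hv, hdj⟩
          rw [hcval.1] at hpos hlt ⊢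
          by_cases hck : D.getD c 0 = k
          · -- c was a frontier cell: y got marked (or already was)
            obtain ⟨w, hw, hcw⟩ := (hFcells c).2 ⟨hc, hck⟩
            have hhit : pvHitF n C G (u :: F') (pvCell n y) = true := by
              refine (pvHitF_true n C G _ _).2 ⟨w, hw, ?_⟩
              refine (pvHitRow_true n C _ _ _).2 ⟨y, ?_, rfl, ?_⟩
              · rw [hcw]; exact hy
              · rw [hcw]; exact hcd
            rw [l2 (pvCell n y)]
            by_cases hdy : D.getD (pvCell n y) 0 = -1
            · rw [if_pos hdy, hhit, if_pos rfl, hck]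
              exact ⟨by omega, by omega⟩
            · rw [if_neg hdy]
              rcases hvals _ hcyn with h | h
              · exact absurd h hdy
              · rw [hck]
                exact ⟨hdy, by omega⟩
          · have hcltk : D.getD c 0 < k := by omega
            obtain ⟨hne, hle⟩ := hclo c hc hpos hcltk y hy hcd
            rw [l2 (pvCell n y), if_neg hne]
            exact ⟨hne, hle⟩
        have hfAL : L.2.length + pvUnm L.1 ≤ fA - (u :: F').length := by
          have hlen : (u :: F').length = F'.length + 1 := List.length_cons
          omega
        have hfBL : pvUnm L.1 + 1 ≤ f := by omega
        obtain ⟨ihB, ihbnd, ihlen⟩ := ih (fA - (u :: F').length) L.1 L.2 (k + 1)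
          (by omega) l1 hvalsL l3 hFcellsL hcloL hfAL hfBL
        have hB : es17LoopB G C (f + 1) (D.map (pvDist n))
            = es17LoopB G C f (L.1.map (pvDist n)) := by
          show (if (es17RoundB G C (D.map (pvDist n))).2 then
              es17LoopB G C f (es17RoundB G C (D.map (pvDist n))).1
            else (es17RoundB G C (D.map (pvDist n))).1) = _
          rw [hst, if_pos rfl, hst1]
        rw [hAstep, hB]
        exact ⟨ihB, ihbnd, ihlen⟩

-- ===== VERDICT (by name: the statement is the Claim_ definition above) =====
theorem es17_spec : Claim_equal_es17 := by
  unfold Claim_equal_es17 Spec_es17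
  intro G C a b _ hPre
  obtain ⟨ha, hb, hC, hG⟩ := hPre
  have hca : pvCell G.length a < G.length := pvCell_lt G.length a ha
  have hcb : pvCell G.length b < G.length := pvCell_lt G.length b hb
  have hrl : (List.replicate G.length (-1 : Int)).length = G.length := by simp
  have hnl : (List.replicate G.length ((G.length : Int))).length = G.length := by simp
  have hset : PySem.List.pySetD (List.replicate G.length (-1 : Int)) a 0
      = (List.replicate G.length (-1 : Int)).set (pvCell G.length a) 0 :=
    pvSetD_cell G.length _ a 0 hrl ha
  have hsetN : PySem.List.pySetD (List.replicate G.length ((G.length : Int))) a 0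
      = (List.replicate G.length ((G.length : Int))).set (pvCell G.length a) 0 :=
    pvSetD_cell G.length _ a 0 hnl ha
  set D0 := (List.replicate G.length (-1 : Int)).set (pvCell G.length a) 0 with hD0def
  have hD0len : D0.length = G.length := by simp [hD0def]
  have hD0get : ∀ j, D0.getD j 0
      = if j = pvCell G.length a ∧ pvCell G.length a < G.length then 0
        else (List.replicate G.length (-1 : Int)).getD j 0 := by
    intro j
    rw [hD0def, pvGetD_set]
    simp
  have hrepl : ∀ j, j < G.length → (List.replicate G.length (-1 : Int)).getD j 0 = -1 :=
    fun j hj => List.getD_replicate _ hj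
  have hdist0 : PySem.List.pySetD (List.replicate G.length ((G.length : Int))) a 0
      = D0.map (pvDist G.length) := by
    rw [hsetN, hD0def, List.map_set, List.map_replicate]
    rfl
  have hcnt : pvUnm D0 + 1 = G.length := by
    have h := pvUnm_set (List.replicate G.length (-1 : Int)) (pvCell G.length a) 0
      (by simpa using hca) (hrepl _ hca) (by omega)
    rw [pvUnm_replicate, ← hD0def] at h
    omega
  have hvals : ∀ j, j < G.length → D0.getD j 0 = -1 ∨
      (0 ≤ D0.getD j 0 ∧ D0.getD j 0 ≤ 0 ∧
        D0.getD j 0 + (pvUnm D0 : Int) ≤ (G.length : Int) - 1) := by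
    intro j hj
    rw [hD0get j]
    by_cases hje : j = pvCell G.length a
    · rw [if_pos ⟨hje, hca⟩]
      refine Or.inr ⟨le_refl 0, le_refl 0, ?_⟩
      omega
    · rw [if_neg (by rintro ⟨h, -⟩; exact hje h)]
      exact Or.inl (hrepl j hj)
  have hFcells : ∀ c : Nat, (∃ u ∈ [a], pvCell G.length u = c)
      ↔ (c < G.length ∧ D0.getD c 0 = 0) := by
    intro c
    constructor
    · rintro ⟨u, hu, hcu⟩
      have : u = a := by simpa using hu
      subst this
      subst hcu
      exact ⟨hca, by rw [hD0get, if_pos ⟨rfl, hca⟩]⟩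
    · rintro ⟨hcl, hval⟩
      rw [hD0get] at hval
      by_cases hje : c = pvCell G.length a
      · exact ⟨a, by simp, hje.symm⟩
      · rw [if_neg (by rintro ⟨h, -⟩; exact hje h), hrepl c hcl] at hval
        omega
  obtain ⟨hmap, hbound, hlen⟩ := pvMain G.length G C hC rfl hG G.length G.length D0 [a] 0
    (le_refl 0) hD0len hvals
    (by
      intro u hu
      have : u = a := by simpa using hu
      subst this
      exact ha)
    hFcells
    (by intro c hc hpos hneg y hy hcd; omega)
    (by simp only [List.length_cons, List.length_nil]; omega)
    (by omega)
  simp only [es17, es17_alt, hset, hdist0, hmap]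
  set Dfin := es17LoopA G C G.length D0 [a] with hDfin
  have hgetA : PySem.List.pyGetD Dfin b 0 = Dfin.getD (pvCell G.length b) 0 :=
    pvGetD_cell G.length Dfin b 0 hlen hb
  have hgetB : PySem.List.pyGetD (Dfin.map (pvDist G.length)) b 0
      = pvDist G.length (Dfin.getD (pvCell G.length b) 0) := by
    rw [pvGetD_cell G.length _ b 0 (by rw [List.length_map]; exact hlen) hb,
      pvGetD_map_dist]
  rw [hgetA, hgetB]
  rcases hbound _ hcb with hfin | hfin
  · rw [if_pos hfin, pvDist, if_pos hfin,
      if_neg (show ¬ ((G.length : Int) < (G.length : Int)) by omega)]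
  · rw [if_neg (show ¬ Dfin.getD (pvCell G.length b) 0 = -1 by omega), pvDist,
      if_neg (show ¬ Dfin.getD (pvCell G.length b) 0 = -1 by omega), if_pos hfin.2]
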